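-- pv_equiv track=rewrite | github.com/subin3277/Algorithm_Py | programmers/level1/둘만의암호.py | solution
-- ===== SOURCE A (Python) =====
-- def solution(s, skip, index):
--     answer = ''
--     slst = list(s)
--     skiplist = list(skip)
--
--     for i in slst :
--         tmp = ord(i)
--         j = 0
--         k = 1
--         while (j < index):
--             if tmp + 1 < 123 and chr(tmp + 1) not in skiplist :
--                 tmp += 1
--                 j += 1
--             elif tmp + 1 > 122 and chr(tmp + 1 - 26) not in skiplist :
--                 tmp -= 25
--                 j += 1
--             else :
--                 tmp += 1
--         answer += chr(tmp)
--
--     return answer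
-- ===== SOURCE B (Python) =====
-- def solution(s, skip, index):
--     skipset = set(skip)
--
--     def nxt(u):
--         # one counted step: first candidate (successor, wrapping 'z'->'a') not in skipset
--         while True:
--             c = u + 1 if u + 1 < 123 else u - 25
--             if chr(c) not in skipset:
--                 return c
--             u += 1
--
--     res = []
--     for ch in s:
--         t = ord(ch)
--         if index > 0:
--             traj = [t]
--             while len(traj) <= index:
--                 u = nxt(traj[-1])
--                 if u in traj:
--                     mu = traj.index(u)
--                     lam = len(traj) - mu
--                     t = traj[mu + (index - mu) % lam]
--                     break
--                 traj.append(u)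
--             else:
--                 t = traj[index]
--         res.append(chr(t))
--     return ''.join(res)
-- ===== Notes on version B (the rewrite author's own statement) =====
-- stated objective: faster
-- what changed: A advances each character one counted step at a time, running its inner while-loop about `index` times per character; B builds, per character, the orbit of the skip-aware successor function until the first repeated value (at most ~150 steps on ASCII) and then jumps directly to position mu + (index - mu) % lam of the detected cycle with modular arithmetic.
import Mathlib
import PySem

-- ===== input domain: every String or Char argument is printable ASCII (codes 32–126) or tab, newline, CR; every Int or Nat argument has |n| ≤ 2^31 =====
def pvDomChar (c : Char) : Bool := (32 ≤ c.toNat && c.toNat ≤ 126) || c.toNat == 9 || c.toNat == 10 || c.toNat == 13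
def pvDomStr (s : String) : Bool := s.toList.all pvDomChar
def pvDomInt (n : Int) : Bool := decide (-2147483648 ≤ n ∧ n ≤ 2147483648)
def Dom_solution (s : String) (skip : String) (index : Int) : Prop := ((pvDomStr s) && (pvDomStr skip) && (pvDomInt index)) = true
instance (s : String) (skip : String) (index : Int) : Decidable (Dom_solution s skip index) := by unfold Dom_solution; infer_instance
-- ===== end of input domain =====

-- B replaces A's O(index) per-character step simulation by cycle detection on the successor
-- function plus a modular jump (alternative algorithm; asymptotically fewer steps in `index`).

-- ===== PORT A =====
-- Inner `while (j < index)` loop of A; `tmp`/`j` are the Python locals.  The two `then tmp`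
-- branches are totality guards mirroring exactly where Python's chr() would raise ValueError
-- (argument < 0 or ≥ 0x110000); they are unreachable from Dom inputs.
def loopA (sk : List Char) (index : Int) (tmp : Int) (j : Int) : Int :=
  if hj : j < index then
    if h1 : tmp + 1 < 123 then
      if tmp + 1 < 0 then tmp  -- Python: chr(tmp+1) raises ValueError (unreachable on Dom)
      else if Char.ofNat (tmp + 1).toNat ∉ sk then loopA sk index (tmp + 1) (j + 1)
      else loopA sk index (tmp + 1) j
    else
      if h3 : 1114112 ≤ tmp + 1 - 26 then tmp  -- Python: chr raises ValueError (unreachable on Dom)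
      else if Char.ofNat (tmp + 1 - 26).toNat ∉ sk then loopA sk index (tmp - 25) (j + 1)
      else loopA sk index (tmp + 1) j
  else tmp
termination_by ((index - j).toNat, (1114139 - tmp).toNat)
decreasing_by
  · exact Prod.Lex.left _ _ (by omega)
  · exact Prod.Lex.right _ (by omega)
  · exact Prod.Lex.left _ _ (by omega)
  · exact Prod.Lex.right _ (by omega)

def solution (s : String) (skip : String) (index : Int) : String :=
  String.ofList (s.toList.map (fun i => Char.ofNat (loopA skip.toList index (i.toNat : Int) 0).toNat))

-- ===== PORT B =====
-- Source B's `nxt`: first candidate (successor, wrapping 'z'→'a' the way A does) not in skipset.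
-- The `then u` guard mirrors exactly where Python's chr(c) raises ValueError (unreachable on Dom).
def nxt (sk : List Char) (u : Int) : Int :=
  if h0 : (if u + 1 < 123 then u + 1 else u - 25) < 0 ∨
          1114112 ≤ (if u + 1 < 123 then u + 1 else u - 25) then u
  else if Char.ofNat (if u + 1 < 123 then u + 1 else u - 25).toNat ∈ sk then nxt sk (u + 1)
  else (if u + 1 < 123 then u + 1 else u - 25)
termination_by (1114139 - u).toNat
decreasing_by
  simp only [not_or, not_lt, not_le] at h0
  split_ifs at h0 <;> omega

-- Source B's `while len(traj) <= index` loop: grow the orbit until the first repeat, then jump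
-- with modular arithmetic; `traj[...]` indexings are always in range, ported via pyGet?/getD.
def trajLoop (sk : List Char) (index : Int) (traj : List Int) : Int :=
  if _h : (traj.length : Int) ≤ index then
    let u := nxt sk ((PySem.List.pyGet? traj (-1)).getD 0)
    match PySem.List.index? traj u with
    | some mu =>
        (PySem.List.pyGet? traj ((mu : Int) + PySem.Int.mod (index - (mu : Int)) ((traj.length : Int) - (mu : Int)))).getD 0
    | none => trajLoop sk index (traj ++ [u])
  else (PySem.List.pyGet? traj index).getD 0
termination_by (index + 1 - traj.length).toNat
decreasing_by
  simp only [List.length_append, List.length_cons, List.length_nil]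
  omega

def solution_alt (s : String) (skip : String) (index : Int) : String :=
  let skipset : PySem.Set Char := PySem.Set.ofList skip.toList
  String.ofList (s.toList.map (fun ch =>
    Char.ofNat ((if 0 < index then trajLoop skipset index [(ch.toNat : Int)] else (ch.toNat : Int)).toNat)))

-- ===== PRECONDITION & SPEC =====
def Spec_solution (s : String) (skip : String) (index : Int) (out : String) : Prop := out = solution_alt s skip index
instance (s : String) (skip : String) (index : Int) (out : String) : Decidable (Spec_solution s skip index out) := by unfold Spec_solution; infer_instance

-- ===== CLAIM (what is proved, stated in full; the proofs are below) =====
def Claim_equal_solution : Prop := ∀ (s : String) (skip : String) (index : Int), Dom_solution s skip index → Spec_solution s skip index (solution s skip index)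

-- ===== LEMMAS AND PROOFS =====

lemma charRound (n : Nat) (h : n < 55296) : (Char.ofNat n).toNat = n := by
  have hv : n.isValidChar := Or.inl h
  rw [Char.ofNat, dif_pos hv]
  simp [Char.ofNatAux, Char.toNat, UInt32.toNat_ofNatLT]

lemma nxt_bounds (sk : List Char) (hsk : ∀ c ∈ sk, c.toNat ≤ 126) :
    ∀ (n : Nat) (u : Int), (153 - u).toNat ≤ n → 0 ≤ u → u ≤ 152 →
      1 ≤ nxt sk u ∧ nxt sk u ≤ 127 := by
  intro n
  induction n with
  | zero => intro u hn h0 h1; omega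
  | succ n ih =>
    intro u hn h0 h1
    rw [nxt.eq_def]
    by_cases hc : u + 1 < 123
    · rw [if_pos hc, dif_neg (by omega : ¬ (u + 1 < 0 ∨ 1114112 ≤ u + 1))]
      by_cases hmem : Char.ofNat (u + 1).toNat ∈ sk
      · rw [if_pos hmem]
        have := hsk _ hmem
        rw [charRound _ (by omega)] at this
        exact ih (u + 1) (by omega) (by omega) (by omega)
      · rw [if_neg hmem]; omega
    · rw [if_neg hc, dif_neg (by omega : ¬ (u - 25 < 0 ∨ 1114112 ≤ u - 25))]
      by_cases hmem : Char.ofNat (u - 25).toNat ∈ sk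
      · rw [if_pos hmem]
        have := hsk _ hmem
        rw [charRound _ (by omega)] at this
        exact ih (u + 1) (by omega) (by omega) (by omega)
      · rw [if_neg hmem]; omega

lemma nxt_congr (sk sk' : List Char) (hm : ∀ c, c ∈ sk ↔ c ∈ sk')
    (hsk : ∀ c ∈ sk, c.toNat ≤ 126) :
    ∀ (n : Nat) (u : Int), (153 - u).toNat ≤ n → 0 ≤ u → u ≤ 152 →
      nxt sk u = nxt sk' u := by
  intro n
  induction n with
  | zero => intro u hn h0 h1; omega
  | succ n ih =>
    intro u hn h0 h1
    conv_lhs => rw [nxt.eq_def]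
    conv_rhs => rw [nxt.eq_def]
    by_cases hc : u + 1 < 123
    · rw [if_pos hc, dif_neg (by omega : ¬ (u + 1 < 0 ∨ 1114112 ≤ u + 1)),
        dif_neg (by omega : ¬ (u + 1 < 0 ∨ 1114112 ≤ u + 1))]
      by_cases hmem : Char.ofNat (u + 1).toNat ∈ sk
      · rw [if_pos hmem, if_pos ((hm _).mp hmem)]
        have := hsk _ hmem
        rw [charRound _ (by omega)] at this
        exact ih (u + 1) (by omega) (by omega) (by omega)
      · rw [if_neg hmem, if_neg (fun h => hmem ((hm _).mpr h))]
    · rw [if_neg hc, dif_neg (by omega : ¬ (u - 25 < 0 ∨ 1114112 ≤ u - 25)),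
        dif_neg (by omega : ¬ (u - 25 < 0 ∨ 1114112 ≤ u - 25))]
      by_cases hmem : Char.ofNat (u - 25).toNat ∈ sk
      · rw [if_pos hmem, if_pos ((hm _).mp hmem)]
        have := hsk _ hmem
        rw [charRound _ (by omega)] at this
        exact ih (u + 1) (by omega) (by omega) (by omega)
      · rw [if_neg hmem, if_neg (fun h => hmem ((hm _).mpr h))]

lemma loopA_eq_nxt (sk : List Char) (index : Int) (hsk : ∀ c ∈ sk, c.toNat ≤ 126) :
    ∀ (n : Nat) (u j : Int), (153 - u).toNat ≤ n → 0 ≤ u → u ≤ 152 → j < index →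
      loopA sk index u j = loopA sk index (nxt sk u) (j + 1) := by
  intro n
  induction n with
  | zero => intro u j hn h0 h1 hj; omega
  | succ n ih =>
    intro u j hn h0 h1 hj
    conv_lhs => rw [loopA.eq_def]
    rw [nxt.eq_def, dif_pos hj]
    by_cases hc : u + 1 < 123
    · rw [dif_pos hc, if_pos hc, if_neg (by omega : ¬ u + 1 < 0),
        dif_neg (by omega : ¬ (u + 1 < 0 ∨ 1114112 ≤ u + 1))]
      by_cases hmem : Char.ofNat (u + 1).toNat ∈ sk
      · rw [if_neg (not_not_intro hmem), if_pos hmem]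
        have hb := hsk _ hmem
        rw [charRound _ (by omega)] at hb
        exact ih (u + 1) j (by omega) (by omega) (by omega) hj
      · rw [if_pos hmem, if_neg hmem]
    · rw [dif_neg hc, if_neg hc, dif_neg (by omega : ¬ 1114112 ≤ u + 1 - 26),
        dif_neg (by omega : ¬ (u - 25 < 0 ∨ 1114112 ≤ u - 25))]
      have he : u + 1 - 26 = u - 25 := by ring
      rw [he]
      by_cases hmem : Char.ofNat (u - 25).toNat ∈ sk
      · rw [if_neg (not_not_intro hmem), if_pos hmem]
        have hb := hsk _ hmem
        rw [charRound _ (by omega)] at hb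
        exact ih (u + 1) j (by omega) (by omega) (by omega) hj
      · rw [if_pos hmem, if_neg hmem]

lemma loopA_iter (sk : List Char) (index : Int) (hsk : ∀ c ∈ sk, c.toNat ≤ 126) :
    ∀ (n : Nat) (u j : Int), (index - j).toNat = n → 0 ≤ u → u ≤ 152 →
      loopA sk index u j = (nxt sk)^[n] u := by
  intro n
  induction n with
  | zero =>
    intro u j hn h0 h1
    rw [loopA.eq_def, dif_neg (by omega : ¬ j < index)]
    rfl
  | succ n ih =>
    intro u j hn h0 h1
    have hj : j < index := by omega
    rw [loopA_eq_nxt sk index hsk (153 - u).toNat u j le_rfl h0 h1 hj]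
    obtain ⟨hb1, hb2⟩ := nxt_bounds sk hsk (153 - u).toNat u le_rfl h0 h1
    rw [ih (nxt sk u) (j + 1) (by omega) (by omega) (by omega)]
    rw [← Function.iterate_succ_apply]

lemma iter_cycle (f : Int → Int) (t : Int) (mu lam : Nat) (hl : 0 < lam)
    (h : f^[mu + lam] t = f^[mu] t) : ∀ m : Nat, f^[mu + m] t = f^[mu + m % lam] t := by
  intro m
  induction m using Nat.strong_induction_on with
  | _ m ihm =>
    by_cases hm : m < lam
    · rw [Nat.mod_eq_of_lt hm]
    · have hm' : lam ≤ m := Nat.le_of_not_lt hm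
      have h1 : mu + m = (m - lam) + (mu + lam) := by omega
      rw [h1, Function.iterate_add_apply, h, ← Function.iterate_add_apply]
      have h2 : m - lam + mu = mu + (m - lam) := by omega
      rw [h2, ihm (m - lam) (by omega), Nat.mod_eq_sub_mod hm']

lemma trajLoop_stop (sk : List Char) (index : Int) (t : Int) (k : Nat)
    (hk1 : 1 ≤ k) (hke : (k : Int) = index + 1) :
    trajLoop sk index ((List.range k).map (fun i => (nxt sk)^[i] t)) = (nxt sk)^[index.toNat] t := by
  rw [trajLoop.eq_def, dif_neg (by simp; omega),
    PySem.List.pyGet?_of_nonneg _ (by omega : (0 : Int) ≤ index)]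
  simp [(show index.toNat < k by omega)]

lemma trajLoop_eq (sk : List Char) (index : Int) (t : Int) :
    ∀ (n : Nat) (k : Nat), (index + 1 - (k : Int)).toNat ≤ n → 1 ≤ k → (k : Int) ≤ index + 1 →
      trajLoop sk index ((List.range k).map (fun i => (nxt sk)^[i] t)) = (nxt sk)^[index.toNat] t := by
  intro n
  induction n with
  | zero => intro k hn hk1 hk2; exact trajLoop_stop sk index t k hk1 (by omega)
  | succ n ih =>
    intro k hn hk1 hk2
    by_cases hc : (k : Int) ≤ index
    · have hlast : (PySem.List.pyGet? ((List.range k).map (fun i => (nxt sk)^[i] t)) (-1)).getD 0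
          = (nxt sk)^[k - 1] t := by
        rw [PySem.List.pyGet?_neg_one, List.getLast?_eq_getElem?]
        simp [(show k - 1 < k by omega)]
      have hu : nxt sk ((PySem.List.pyGet? ((List.range k).map (fun i => (nxt sk)^[i] t)) (-1)).getD 0)
          = (nxt sk)^[k] t := by
        conv_rhs => rw [show k = (k - 1) + 1 from by omega, Function.iterate_succ_apply']
        rw [hlast]
      rw [trajLoop.eq_def, dif_pos (by simpa using hc)]
      simp only [hu]
      rcases hidx : PySem.List.index? ((List.range k).map (fun i => (nxt sk)^[i] t)) ((nxt sk)^[k] t)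
        with _ | mu
      · dsimp only
        have hsnoc : (List.range k).map (fun i => (nxt sk)^[i] t) ++ [(nxt sk)^[k] t]
            = (List.range (k + 1)).map (fun i => (nxt sk)^[i] t) := by
          rw [List.range_succ, List.map_append]
          rfl
        rw [hsnoc]
        exact ih (k + 1) (by omega) (by omega) (by push_cast; omega)
      · dsimp only
        obtain ⟨hmu, hval, -⟩ := PySem.List.getElem_of_index?_eq_some hidx
        simp only [List.length_map, List.length_range] at hmu
        have hval' : (nxt sk)^[mu] t = (nxt sk)^[k] t := by
          simpa using hval
        have hcyc := iter_cycle (nxt sk) t mu (k - mu) (by omega)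
          (by rw [show mu + (k - mu) = k from by omega]; exact hval'.symm)
        have hmod : PySem.Int.mod (index - (mu : Int))
            ((((List.range k).map (fun i => (nxt sk)^[i] t)).length : Int) - (mu : Int))
            = (((index.toNat - mu) % (k - mu) : Nat) : Int) := by
          simp only [List.length_map, List.length_range]
          rw [PySem.Int.mod_eq_emod_of_pos (by omega)]
          rw [show index - (mu : Int) = ((index.toNat - mu : Nat) : Int) from by omega,
            show (k : Int) - (mu : Int) = ((k - mu : Nat) : Int) from by omega]
          norm_cast
        rw [hmod]
        have hr : (index.toNat - mu) % (k - mu) < k - mu := Nat.mod_lt _ (by omega)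
        rw [show (mu : Int) + (((index.toNat - mu) % (k - mu) : Nat) : Int)
            = ((mu + (index.toNat - mu) % (k - mu) : Nat) : Int) from by push_cast; ring,
          PySem.List.pyGet?_natCast]
        simp only [List.getElem?_map, List.getElem?_range,
          (show mu + (index.toNat - mu) % (k - mu) < k by omega), Option.map_some,
          Option.getD_some]
        have hfin : (nxt sk)^[index.toNat] t
            = (nxt sk)^[mu + (index.toNat - mu) % (k - mu)] t := by
          have h1 := hcyc (index.toNat - mu)
          rwa [show mu + (index.toNat - mu) = index.toNat from by omega] at h1
        rw [hfin]
    · exact trajLoop_stop sk index t k hk1 (by omega)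

lemma iter_congr (sk sk' : List Char) (hm : ∀ c, c ∈ sk ↔ c ∈ sk')
    (hsk : ∀ c ∈ sk, c.toNat ≤ 126) :
    ∀ (n : Nat) (u : Int), 0 ≤ u → u ≤ 152 → (nxt sk)^[n] u = (nxt sk')^[n] u := by
  intro n
  induction n with
  | zero => intro u h0 h1; rfl
  | succ n ih =>
    intro u h0 h1
    rw [Function.iterate_succ_apply, Function.iterate_succ_apply]
    obtain ⟨hb1, hb2⟩ := nxt_bounds sk hsk (153 - u).toNat u le_rfl h0 h1
    rw [← nxt_congr sk sk' hm hsk (153 - u).toNat u le_rfl h0 h1]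
    exact ih (nxt sk u) (by omega) (by omega)

-- ===== VERDICT (by name: the statement is the Claim_ definition above) =====
theorem solution_spec : Claim_equal_solution := by
  intro s skip index hdom
  have hd : (pvDomStr s && pvDomStr skip && pvDomInt index) = true := hdom
  simp only [Bool.and_eq_true] at hd
  obtain ⟨⟨hs, hskip⟩, -⟩ := hd
  have hskC : ∀ c ∈ skip.toList, c.toNat ≤ 126 := by
    intro c hc
    have h2 := List.all_eq_true.mp hskip c hc
    simp only [pvDomChar, Bool.or_eq_true, Bool.and_eq_true, decide_eq_true_eq,
      beq_iff_eq] at h2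
    omega
  have hm : ∀ c, c ∈ skip.toList ↔ c ∈ PySem.Set.ofList skip.toList :=
    fun c => (PySem.Set.mem_ofList _ _).symm
  show solution s skip index = solution_alt s skip index
  simp only [solution, solution_alt]
  congr 1
  apply List.map_congr_left
  intro c hc
  have hcd := List.all_eq_true.mp hs c hc
  simp only [pvDomChar, Bool.or_eq_true, Bool.and_eq_true, decide_eq_true_eq,
    beq_iff_eq] at hcd
  have h0 : (0 : Int) ≤ (c.toNat : Int) := by omega
  have h1 : ((c.toNat : Nat) : Int) ≤ 152 := by omega
  congr 2
  by_cases hi : 0 < index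
  · rw [if_pos hi]
    rw [loopA_iter skip.toList index hskC index.toNat (c.toNat) 0 (by omega) h0 h1]
    rw [show [((c.toNat : Nat) : Int)]
        = (List.range 1).map (fun i => (nxt (PySem.Set.ofList skip.toList))^[i] ((c.toNat : Nat) : Int))
      from by simp]
    rw [trajLoop_eq (PySem.Set.ofList skip.toList) index ((c.toNat : Nat) : Int)
      (index + 1 - ((1 : Nat) : Int)).toNat 1 le_rfl le_rfl (by omega)]
    exact iter_congr skip.toList _ hm hskC index.toNat _ h0 h1
  · rw [if_neg hi]
    rw [loopA_iter skip.toList index hskC 0 (c.toNat) 0 (by omega) h0 h1]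
    rfl
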